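-- pv_equiv track=rewrite | github.com/Joel-Hwang/leetcode | Python3/Parse.py | isSentence
-- ===== SOURCE A (Python) =====
-- def isSentence(s) -> bool:
--     input = str(s).split()
--     csr = 0
--
--     grammar = {'S': [['VP', 'NP']],
--      'NP': [['N', 'DET']],
--      'VP': [['V']], 'DET': [['the'], ['an'], ['my'], ['most']],
--      'N': [['elephant'], ['elephants'], ['mouse'], ['mice']],
--      'V': [['sneezed'], ['giggled'], ['trumpeted']]}
--
--     stk = []
--     stk.append('S')
--     while len(stk)>0:
--         key = stk.pop()
--         val = grammar.get(key)
--         if(len(val) == 1): # terminal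
--             for i in val[0]:
--                 stk.append(i)
--         else: # non terminal
--             isMatch = False
--             for i in val:
--                 #if the token is in grammar
--                 if input[csr] == i[0]:
--                     isMatch = True
--                     csr+=1
--                     break
--             if not isMatch:
--                 return False
--     return True
-- ===== SOURCE B (Python) =====
-- def isSentence(s) -> bool:
--     w = str(s).split()
--     if w[0] not in ('the', 'an', 'my', 'most'):
--         return False
--     if w[1] not in ('elephant', 'elephants', 'mouse', 'mice'):
--         return False
--     if w[2] not in ('sneezed', 'giggled', 'trumpeted'):
--         return False
--     return True
-- ===== Notes on version B (the rewrite author's own statement) =====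
-- stated objective: simpler
-- what changed: Replaces the grammar dictionary and the explicit stack-machine parse loop by three direct positional membership checks on the split tokens (determiner at index 0, noun at index 1, verb at index 2), which is what the fixed toy grammar amounts to.
import Mathlib
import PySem

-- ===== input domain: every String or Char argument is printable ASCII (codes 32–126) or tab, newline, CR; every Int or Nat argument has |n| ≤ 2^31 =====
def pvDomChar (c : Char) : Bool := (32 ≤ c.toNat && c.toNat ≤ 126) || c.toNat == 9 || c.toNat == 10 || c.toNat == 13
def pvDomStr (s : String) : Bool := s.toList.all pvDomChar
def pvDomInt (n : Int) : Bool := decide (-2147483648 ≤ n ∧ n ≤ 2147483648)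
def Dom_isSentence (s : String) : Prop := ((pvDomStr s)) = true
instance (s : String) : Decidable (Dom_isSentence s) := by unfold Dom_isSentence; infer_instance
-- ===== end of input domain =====

-- B replaces A's grammar dictionary and stack-machine loop by three direct positional
-- membership checks on the split tokens (simpler; same raising points, so Pre_ excludes them).

-- ===== PORT A =====
-- the grammar dict, insertion order as in the Python source
def grammarA : PySem.Dict String (List (List String)) :=
  (((((PySem.Dict.empty.insert "S" [["VP","NP"]]).insert "NP"
      [["N","DET"]]).insert "VP" [["V"]]).insert "DET"
      [["the"],["an"],["my"],["most"]]).insert "N"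
      [["elephant"],["elephants"],["mouse"],["mice"]]).insert "V"
      [["sneezed"],["giggled"],["trumpeted"]]

-- the inner 'for i in val' scan: first production whose head equals input[csr];
-- none = IndexError on input[csr]
def matchA (input : List String) (csr : Int) : List (List String) → Option (Bool × Int)
  | [] => some (false, csr)
  | i :: rest =>
    match PySem.List.pyGet? input csr with
    | none => none
    | some tok =>
      if tok == (PySem.List.pyGet? i 0).getD "" then some (true, csr + 1)
      else matchA input csr rest

-- the while loop; the stack is kept top-first (Python appends/pops at the end),
-- fuel-bounded for totality (the loop performs at most 6 pops); none = exception
def loopA (input : List String) : Nat → List String → Int → Option Bool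
  | 0, _, _ => none
  | fuel + 1, stk, csr =>
    match stk with
    | [] => some true
    | key :: stk' =>
      match grammarA.get? key with
      | none => none  -- Python would raise TypeError; unreachable (every pushed key is a grammar key)
      | some val =>
        if val.length == 1 then
          loopA input fuel ((val.headD []).reverse ++ stk') csr
        else
          match matchA input csr val with
          | none => none
          | some (isMatch, csr') =>
            if !isMatch then some false else loopA input fuel stk' csr'

def isSentence (s : String) : Bool :=
  match loopA (PySem.Str.split₀ s) 16 ["S"] 0 with
  | some b => b
  | none => false  -- Python raises here; excluded by Pre_isSentence

-- ===== PORT B =====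
def isSentence_alt (s : String) : Bool :=
  let w := PySem.Str.split₀ s
  match PySem.List.pyGet? w 0 with
  | none => false  -- IndexError; excluded by Pre_isSentence
  | some t0 =>
    if !(["the", "an", "my", "most"].contains t0) then false
    else
      match PySem.List.pyGet? w 1 with
      | none => false  -- IndexError; excluded by Pre_isSentence
      | some t1 =>
        if !(["elephant", "elephants", "mouse", "mice"].contains t1) then false
        else
          match PySem.List.pyGet? w 2 with
          | none => false  -- IndexError; excluded by Pre_isSentence
          | some t2 => ["sneezed", "giggled", "trumpeted"].contains t2

-- ===== PRECONDITION & SPEC =====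
-- Pre_ excludes exactly the inputs on which A (and B) raise IndexError: a token list
-- that ends before the next positional check (e.g. empty, or 'the', or 'the mouse').
def Pre_isSentence (s : String) : Prop :=
  let w := PySem.Str.split₀ s
  1 ≤ w.length ∧
    (w.getD 0 "" ∈ ["the", "an", "my", "most"] →
      2 ≤ w.length ∧
        (w.getD 1 "" ∈ ["elephant", "elephants", "mouse", "mice"] → 3 ≤ w.length))
instance (s : String) : Decidable (Pre_isSentence s) := by unfold Pre_isSentence; infer_instance

def pvWitness_isSentence : String := "the mouse sneezed"

def Spec_isSentence (s : String) (out : Bool) : Prop := out = isSentence_alt s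
instance (s : String) (out : Bool) : Decidable (Spec_isSentence s out) := by unfold Spec_isSentence; infer_instance

-- ===== CLAIM (what is proved, stated in full; the proofs are below) =====
def Claim_equal_isSentence : Prop :=
  ∀ (s : String), Dom_isSentence s → Pre_isSentence s → Spec_isSentence s (isSentence s)

-- ===== LEMMAS AND PROOFS =====

theorem matchA_eval (w : List String) (csr : Int) (t : String)
    (h : PySem.List.pyGet? w csr = some t) (val : List (List String)) :
    matchA w csr val =
      some (val.any (fun i => t == (PySem.List.pyGet? i 0).getD ""),
        if val.any (fun i => t == (PySem.List.pyGet? i 0).getD "") then csr + 1 else csr) := by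
  induction val with
  | nil => simp [matchA]
  | cons i rest ih =>
    by_cases he : (t == (PySem.List.pyGet? i 0).getD "") = true <;>
      simp [matchA, h, he, ih]

theorem loopA_run0 (w : List String) (t0 : String)
    (g0 : PySem.List.pyGet? w 0 = some t0)
    (hb0 : ([["the"],["an"],["my"],["most"]].any
        (fun i => t0 == (PySem.List.pyGet? i 0).getD "")) = false) :
    loopA w 16 ["S"] 0 = some false := by
  change (match matchA w 0 [["the"],["an"],["my"],["most"]] with
    | none => none
    | some (m, c) => if !m then some false else loopA w 13 ["N","VP"] c) = _
  rw [matchA_eval w 0 t0 g0, hb0]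
  rfl

theorem loopA_run1 (w : List String) (t0 t1 : String)
    (g0 : PySem.List.pyGet? w 0 = some t0)
    (g1 : PySem.List.pyGet? w 1 = some t1)
    (hb0 : ([["the"],["an"],["my"],["most"]].any
        (fun i => t0 == (PySem.List.pyGet? i 0).getD "")) = true)
    (hb1 : ([["elephant"],["elephants"],["mouse"],["mice"]].any
        (fun i => t1 == (PySem.List.pyGet? i 0).getD "")) = false) :
    loopA w 16 ["S"] 0 = some false := by
  change (match matchA w 0 [["the"],["an"],["my"],["most"]] with
    | none => none
    | some (m, c) => if !m then some false else loopA w 13 ["N","VP"] c) = _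
  rw [matchA_eval w 0 t0 g0, hb0]
  change (match matchA w 1 [["elephant"],["elephants"],["mouse"],["mice"]] with
    | none => none
    | some (m, c) => if !m then some false else loopA w 12 ["VP"] c) = _
  rw [matchA_eval w 1 t1 g1, hb1]
  rfl

theorem loopA_run2 (w : List String) (t0 t1 t2 : String)
    (g0 : PySem.List.pyGet? w 0 = some t0)
    (g1 : PySem.List.pyGet? w 1 = some t1)
    (g2 : PySem.List.pyGet? w 2 = some t2)
    (hb0 : ([["the"],["an"],["my"],["most"]].any
        (fun i => t0 == (PySem.List.pyGet? i 0).getD "")) = true)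
    (hb1 : ([["elephant"],["elephants"],["mouse"],["mice"]].any
        (fun i => t1 == (PySem.List.pyGet? i 0).getD "")) = true) :
    loopA w 16 ["S"] 0 =
      some (([["sneezed"],["giggled"],["trumpeted"]].any
        (fun i => t2 == (PySem.List.pyGet? i 0).getD ""))) := by
  change (match matchA w 0 [["the"],["an"],["my"],["most"]] with
    | none => none
    | some (m, c) => if !m then some false else loopA w 13 ["N","VP"] c) = _
  rw [matchA_eval w 0 t0 g0, hb0]
  change (match matchA w 1 [["elephant"],["elephants"],["mouse"],["mice"]] with
    | none => none
    | some (m, c) => if !m then some false else loopA w 12 ["VP"] c) = _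
  rw [matchA_eval w 1 t1 g1, hb1]
  change (match matchA w 2 [["sneezed"],["giggled"],["trumpeted"]] with
    | none => none
    | some (m, c) => if !m then some false else loopA w 10 ([] : List String) c) = _
  rw [matchA_eval w 2 t2 g2]
  cases ([["sneezed"],["giggled"],["trumpeted"]].any
      (fun i => t2 == (PySem.List.pyGet? i 0).getD "")) <;> rfl

theorem strBeq (a b : String) : (a == b) = decide (a = b) := by
  by_cases h : a = b <;> simp [h]

theorem loopA_eq (w : List String)
    (h1 : 1 ≤ w.length)
    (h2 : w.getD 0 "" ∈ ["the", "an", "my", "most"] →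
      2 ≤ w.length ∧
        (w.getD 1 "" ∈ ["elephant", "elephants", "mouse", "mice"] → 3 ≤ w.length)) :
    (loopA w 16 ["S"] 0).getD false =
      (match PySem.List.pyGet? w 0 with
      | none => false
      | some t0 =>
        if !(["the", "an", "my", "most"].contains t0) then false
        else
          match PySem.List.pyGet? w 1 with
          | none => false
          | some t1 =>
            if !(["elephant", "elephants", "mouse", "mice"].contains t1) then false
            else
              match PySem.List.pyGet? w 2 with
              | none => false
              | some t2 => ["sneezed", "giggled", "trumpeted"].contains t2) := by
  match w, h1 with
  | t0 :: w', _ =>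
    have g0 : PySem.List.pyGet? (t0 :: w') 0 = some t0 := by
      simp [PySem.List.pyGet?, PySem.List.pyIdx?]
    by_cases hd : t0 ∈ ["the", "an", "my", "most"]
    · have hb0 : ([["the"],["an"],["my"],["most"]].any
          (fun i => t0 == (PySem.List.pyGet? i 0).getD "")) = true := by
        simpa [PySem.List.pyGet?, PySem.List.pyIdx?] using hd
      obtain ⟨hl2, h3⟩ := h2 (by simpa using hd)
      match w', hl2 with
      | t1 :: w'', _ =>
        have g1 : PySem.List.pyGet? (t0 :: t1 :: w'') 1 = some t1 := by
          simp [PySem.List.pyGet?, PySem.List.pyIdx?]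
        by_cases hn : t1 ∈ ["elephant", "elephants", "mouse", "mice"]
        · have hb1 : ([["elephant"],["elephants"],["mouse"],["mice"]].any
              (fun i => t1 == (PySem.List.pyGet? i 0).getD "")) = true := by
            simpa [PySem.List.pyGet?, PySem.List.pyIdx?] using hn
          obtain ⟨t2, w''', rfl⟩ : ∃ a l, w'' = a :: l := by
            have h3' := h3 (by simpa using hn)
            cases w'' with
            | nil => simp at h3'
            | cons a l => exact ⟨a, l, rfl⟩
          have g2 : PySem.List.pyGet? (t0 :: t1 :: t2 :: w''') 2 = some t2 := by
            simp [PySem.List.pyGet?, PySem.List.pyIdx?,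
              show (2:Int) ≤ (w'''.length:Int)+1+1 from by omega]
          rw [loopA_run2 _ t0 t1 t2 g0 g1 g2 hb0 hb1, g0, g1, g2]
          simp [PySem.List.pyGet?, PySem.List.pyIdx?, hd, hn, strBeq]
        · have hb1 : ([["elephant"],["elephants"],["mouse"],["mice"]].any
              (fun i => t1 == (PySem.List.pyGet? i 0).getD "")) = false := by
            simpa [PySem.List.pyGet?, PySem.List.pyIdx?] using hn
          rw [loopA_run1 _ t0 t1 g0 g1 hb0 hb1, g0, g1]
          simp [hd, hn]
    · have hb0 : ([["the"],["an"],["my"],["most"]].any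
          (fun i => t0 == (PySem.List.pyGet? i 0).getD "")) = false := by
        simpa [PySem.List.pyGet?, PySem.List.pyIdx?] using hd
      rw [loopA_run0 _ t0 g0 hb0, g0]
      simp [hd]

-- ===== VERDICT (by name: the statement is the Claim_ definition above) =====
theorem isSentence_spec : Claim_equal_isSentence := by
  intro s _ hpre
  obtain ⟨h1, h2⟩ := hpre
  show isSentence s = isSentence_alt s
  have hL : isSentence s = (loopA (PySem.Str.split₀ s) 16 ["S"] 0).getD false := by
    unfold isSentence; cases loopA (PySem.Str.split₀ s) 16 ["S"] 0 <;> rfl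
  rw [hL, loopA_eq (PySem.Str.split₀ s) h1 h2]
  rfl
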